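-- pv_equiv track=rewrite | github.com/ankurtry1/arthadrishti | scripts/merge_z1_into_clean_data.py | find_col_case_insensitive
-- ===== SOURCE A (Python) =====
-- from typing import List, Optional
--
-- def find_col_case_insensitive(columns: List[str], candidates: List[str]) -> Optional[str]:
--     for cand in candidates:
--         for col in columns:
--             if cand.lower() == col.lower():
--                 return col
--     for col in columns:
--         col_l = col.lower()
--         for cand in candidates:
--             if cand.lower() in col_l:
--                 return col
--     return None
-- ===== SOURCE B (Python) =====
-- def find_col_case_insensitive(columns, candidates):
--     # Single fused pass over the columns with two accumulators:
--     # best      = (candidate index, column) of the exact match whose candidate comes earliest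
--     #             (ties broken by the earlier column, via the strict '<'),
--     # first_sub = the first column containing some lowered candidate as a substring.
--     # Exact matches take priority over substring hits, like A's two staged scans.
--     # The candidate index for a column comes from a first-occurrence index map built once.
--     cands_l = [cand.lower() for cand in candidates]
--     first_idx = {}
--     for i, cl in enumerate(cands_l):
--         first_idx.setdefault(cl, i)
--     best = None
--     first_sub = None
--     for col in columns:
--         col_l = col.lower()
--         i = first_idx.get(col_l)
--         if i is not None and (best is None or i < best[0]):
--             best = (i, col)
--         if first_sub is None and any(cl in col_l for cl in cands_l):
--             first_sub = col
--     if best is not None: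
--         return best[1]
--     if first_sub is not None:
--         return first_sub
--     return None
-- ===== Notes on version B (the rewrite author's own statement) =====
-- stated objective: alternative
-- what changed: A's two staged early-return scans (candidate-major exact pass, then column-major substring pass) are fused into ONE column-major loop maintaining two accumulators — the best exact match (earliest candidate index, ties to the earlier column) and the first substring hit — with the per-column candidate scan replaced by a first-occurrence index map built once; the decision is taken after the loop.
import Mathlib
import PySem

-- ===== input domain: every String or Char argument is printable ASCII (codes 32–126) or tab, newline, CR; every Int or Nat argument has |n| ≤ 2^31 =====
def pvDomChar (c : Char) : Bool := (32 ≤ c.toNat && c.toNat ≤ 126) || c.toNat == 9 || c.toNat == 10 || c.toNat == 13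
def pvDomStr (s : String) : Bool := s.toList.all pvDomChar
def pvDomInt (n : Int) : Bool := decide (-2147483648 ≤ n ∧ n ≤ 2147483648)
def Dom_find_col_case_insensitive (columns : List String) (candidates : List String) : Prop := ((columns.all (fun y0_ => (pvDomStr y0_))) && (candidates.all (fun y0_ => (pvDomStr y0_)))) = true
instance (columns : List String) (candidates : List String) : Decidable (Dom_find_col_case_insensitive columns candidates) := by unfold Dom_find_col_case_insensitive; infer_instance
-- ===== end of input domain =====

-- B fuses A's two staged early-return scans into one column-major pass with two accumulators (best exact match by candidate index, first substring hit); same results, different traversal (not claimed faster).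


-- ===== PORT A =====
-- A's phase 2: 'for col in columns: if any cand.lower() in col.lower(): return col'
def fcci_phase2 (candidates : List String) : List String → Option String
  | [] => none
  | col :: rest =>
      let col_l := PySem.Str.lower col
      if candidates.any (fun cand => PySem.Str.isIn (PySem.Str.lower cand) col_l) then some col
      else fcci_phase2 candidates rest

-- inner loop of phase 1: 'for col in columns: if cand.lower() == col.lower(): return col'
def fcci_a_inner (cand : String) : List String → Option String
  | [] => none
  | col :: rest =>
      if PySem.Str.lower cand = PySem.Str.lower col then some col
      else fcci_a_inner cand rest

-- outer loop of phase 1: 'for cand in candidates: …'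
def fcci_a_phase1 (columns : List String) : List String → Option String
  | [] => none
  | cand :: rest =>
      match fcci_a_inner cand columns with
      | some col => some col
      | none => fcci_a_phase1 columns rest

def find_col_case_insensitive (columns : List String) (candidates : List String) : Option String :=
  match fcci_a_phase1 columns candidates with
  | some col => some col
  | none => fcci_phase2 candidates columns

-- ===== PORT B =====
-- 'first_idx = {}; for i, cl in enumerate(cands_l): first_idx.setdefault(cl, i)'
def fcci_first_idx (cands_l : List String) : PySem.Dict String Int :=
  (PySem.List.enumerate cands_l).foldl (fun d p => d.setdefault p.2 p.1) PySem.Dict.empty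

-- 'if i is not None and (best is None or i < best[0]): best = (i, col)'
def fcci_combine (b : Option (Int × String)) (i? : Option Int) (col : String) : Option (Int × String) :=
  match i? with
  | none => b
  | some i =>
      match b with
      | none => some (i, col)
      | some p => if i < p.1 then some (i, col) else some p

-- one iteration of B's single loop over the columns
def fcci_b_step (cands_l : List String) (first_idx : PySem.Dict String Int)
    (st : Option (Int × String) × Option String) (col : String) :
    Option (Int × String) × Option String :=
  let col_l := PySem.Str.lower col
  let best := fcci_combine st.1 (first_idx.get? col_l) col
  let fs := match st.2 with
    | some c => some c
    | none => if cands_l.any (fun cl => PySem.Str.isIn cl col_l) then some col else none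
  (best, fs)

def find_col_case_insensitive_alt (columns : List String) (candidates : List String) : Option String :=
  let cands_l := candidates.map PySem.Str.lower
  let first_idx := fcci_first_idx cands_l
  let st := columns.foldl (fcci_b_step cands_l first_idx) (none, none)
  match st.1 with
  | some b => some b.2
  | none =>
      match st.2 with
      | some c => some c
      | none => none

-- ===== PRECONDITION & SPEC =====
def Spec_find_col_case_insensitive (columns : List String) (candidates : List String) (out : Option String) : Prop := out = find_col_case_insensitive_alt columns candidates
instance (columns : List String) (candidates : List String) (out : Option String) : Decidable (Spec_find_col_case_insensitive columns candidates out) := by unfold Spec_find_col_case_insensitive; infer_instance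

-- ===== CLAIM (what is proved, stated in full; the proofs are below) =====
def Claim_equal_find_col_case_insensitive : Prop := ∀ (columns : List String) (candidates : List String), Dom_find_col_case_insensitive columns candidates → Spec_find_col_case_insensitive columns candidates (find_col_case_insensitive columns candidates)

-- ===== LEMMAS AND PROOFS =====

-- proof-side view of the index map: first index of an exact (lowered) match
def fcci_idx? (cands_l : List String) (col_l : String) : Option Int :=
  ((PySem.List.enumerate cands_l).find? (fun p => p.2 == col_l)).map (·.1)

-- a fold of setdefaults looks up to the FIRST pair with the given key
theorem fcci_setdefault_fold_get? (pairs : List (Int × String)) (k : String) :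
    ∀ d : PySem.Dict String Int,
      (pairs.foldl (fun d p => d.setdefault p.2 p.1) d).get? k =
        (d.get? k).or ((pairs.find? (fun p => p.2 == k)).map (·.1)) := by
  induction pairs with
  | nil => intro d; simp
  | cons p ps ih =>
      intro d
      simp only [List.foldl_cons, ih, List.find?_cons]
      by_cases hk : k = p.2
      · subst hk
        rw [PySem.Dict.get?_setdefault_self]
        cases hd : d.get? p.2 <;> simp
      · rw [PySem.Dict.get?_setdefault_of_ne (hne := hk)]
        have hne : (p.2 == k) = false := by simp; exact fun h => hk h.symm
        simp [hne]

theorem fcci_first_idx_get? (cands_l : List String) (x : String) :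
    (fcci_first_idx cands_l).get? x = fcci_idx? cands_l x := by
  unfold fcci_first_idx fcci_idx?
  rw [fcci_setdefault_fold_get?]
  simp

-- the two components of B's fold state evolve independently
def fcci_bestF (cands_l : List String) (b : Option (Int × String)) (cols : List String) : Option (Int × String) :=
  cols.foldl (fun b col => fcci_combine b (fcci_idx? cands_l (PySem.Str.lower col)) col) b

def fcci_subF (cands_l : List String) (f : Option String) (cols : List String) : Option String :=
  cols.foldl (fun f col =>
    match f with
    | some c => some c
    | none => if cands_l.any (fun cl => PySem.Str.isIn cl (PySem.Str.lower col)) then some col else none) f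

theorem fcci_fold_split (cands_l : List String) (cols : List String) :
    ∀ st, cols.foldl (fcci_b_step cands_l (fcci_first_idx cands_l)) st =
      (fcci_bestF cands_l st.1 cols, fcci_subF cands_l st.2 cols) := by
  induction cols with
  | nil => intro st; simp [fcci_bestF, fcci_subF]
  | cons c cs ih =>
      intro st
      simp [List.foldl_cons, ih, fcci_bestF, fcci_subF, fcci_b_step, fcci_first_idx_get?]

-- B's substring accumulator equals A's phase 2
theorem fcci_subF_some (cands_l : List String) (c : String) (cols : List String) :
    fcci_subF cands_l (some c) cols = some c := by
  induction cols with
  | nil => rfl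
  | cons x xs ih => simpa [fcci_subF, List.foldl_cons] using ih

theorem fcci_subF_eq (candidates : List String) (cols : List String) :
    fcci_subF (candidates.map PySem.Str.lower) none cols = fcci_phase2 candidates cols := by
  induction cols with
  | nil => rfl
  | cons col rest ih =>
      have hstep : fcci_subF (candidates.map PySem.Str.lower) none (col :: rest) =
          fcci_subF (candidates.map PySem.Str.lower)
            (if (candidates.map PySem.Str.lower).any (fun cl => PySem.Str.isIn cl (PySem.Str.lower col))
             then some col else none) rest := rfl
      have hany : (candidates.map PySem.Str.lower).any (fun cl => PySem.Str.isIn cl (PySem.Str.lower col)) =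
          candidates.any (fun cand => PySem.Str.isIn (PySem.Str.lower cand) (PySem.Str.lower col)) := by
        rw [List.any_map]; rfl
      rw [hstep, hany]
      by_cases h : candidates.any (fun cand => PySem.Str.isIn (PySem.Str.lower cand) (PySem.Str.lower col)) = true
      · rw [if_pos h, fcci_subF_some, fcci_phase2, if_pos h]
      · rw [if_neg h, ih, fcci_phase2, if_neg h]

-- fcci_idx? unfolded one candidate at a time
theorem fcci_enum_find_shift (x : String) (l : List String) :
    ∀ s : Int, ((PySem.List.enumerate l s).find? (fun p => p.2 == x)).map (·.1) =
      (fcci_idx? l x).map (· + s) := by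
  induction l with
  | nil => intro s; simp [PySem.List.enumerate_nil, fcci_idx?]
  | cons c cs ih =>
      intro s
      by_cases h : (c == x) = true
      · simp [fcci_idx?, PySem.List.enumerate_cons, List.find?_cons, h]
      · have h' : (c == x) = false := by simpa using h
        have h0 := ih 1
        have hs := ih (s + 1)
        simp only [fcci_idx?, PySem.List.enumerate_cons, List.find?_cons, h', zero_add] at hs h0 ⊢
        rw [hs, h0]
        cases List.find? (fun p => p.2 == x) (PySem.List.enumerate cs) with
        | none => rfl
        | some p => simp only [Option.map_some, Option.some.injEq]; omega

theorem fcci_idx?_cons (c0 : String) (rest : List String) (col_l : String) :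
    fcci_idx? (c0 :: rest) col_l =
      if c0 = col_l then some 0 else (fcci_idx? rest col_l).map (· + 1) := by
  by_cases h : c0 = col_l
  · simp [fcci_idx?, PySem.List.enumerate_cons, List.find?_cons, h]
  · have h' : (c0 == col_l) = false := by simpa using h
    simp only [fcci_idx?, PySem.List.enumerate_cons, List.find?_cons, h', if_neg h]
    exact fcci_enum_find_shift col_l rest 1

-- every index fcci_idx? produces is nonnegative
theorem fcci_idx?_nonneg (cands_l : List String) (col_l : String) (i : Int)
    (h : fcci_idx? cands_l col_l = some i) : 0 ≤ i := by
  unfold fcci_idx? at h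
  cases hf : (PySem.List.enumerate cands_l 0).find? (fun p => p.2 == col_l) with
  | none => rw [hf] at h; simp at h
  | some p =>
      rw [hf] at h
      have hm := List.mem_of_find?_eq_some hf
      rw [PySem.List.mem_enumerate_iff] at hm
      obtain ⟨k, hk, rfl⟩ := hm
      simp at h
      omega

-- with no candidates, the best accumulator never changes
theorem fcci_bestF_nil_cands (cols : List String) :
    ∀ b, fcci_bestF [] b cols = b := by
  induction cols with
  | nil => intro b; rfl
  | cons c cs ih =>
      intro b
      have : fcci_bestF [] b (c :: cs) = fcci_bestF [] b cs := rfl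
      rw [this, ih]

-- once the accumulator holds index 0, it is final (all indices are ≥ 0)
theorem fcci_bestF_zero_fixed (cands_l : List String) (cols : List String) (s : String) :
    fcci_bestF cands_l (some (0, s)) cols = some (0, s) := by
  induction cols with
  | nil => rfl
  | cons c cs ih =>
      simp only [fcci_bestF, List.foldl_cons] at *
      cases h : fcci_idx? cands_l (PySem.Str.lower c) with
      | none => simpa [fcci_combine, h] using ih
      | some i =>
          have hi := fcci_idx?_nonneg _ _ _ h
          have hlt : ¬ i < (0 : Int) := by omega
          simpa [fcci_combine, h, hlt] using ih

-- A's inner phase-1 scan restated on an already-lowered candidate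
def fcci_findcol (c0 : String) : List String → Option String
  | [] => none
  | col :: cs => if PySem.Str.lower col = c0 then some col else fcci_findcol c0 cs

theorem fcci_a_inner_eq_findcol (cand : String) (cols : List String) :
    fcci_a_inner cand cols = fcci_findcol (PySem.Str.lower cand) cols := by
  induction cols with
  | nil => rfl
  | cons col cs ih =>
      simp only [fcci_a_inner, fcci_findcol, ih]
      by_cases h : PySem.Str.lower cand = PySem.Str.lower col
      · rw [if_pos h, if_pos h.symm]
      · rw [if_neg h, if_neg (fun h' => h h'.symm)]

-- A's phase 1 restated on the lowered candidate list
def fcci_phase1L (cols : List String) : List String → Option String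
  | [] => none
  | c0 :: rest =>
      match fcci_findcol c0 cols with
      | some col => some col
      | none => fcci_phase1L cols rest

theorem fcci_a_phase1_eq_L (cols : List String) (cands : List String) :
    fcci_a_phase1 cols cands = fcci_phase1L cols (cands.map PySem.Str.lower) := by
  induction cands with
  | nil => rfl
  | cons c cs ih => simp only [fcci_a_phase1, List.map_cons, fcci_phase1L, ih, fcci_a_inner_eq_findcol]

-- when some column matches candidate 0 exactly, the fold ends at (0, first such column)
theorem fcci_bestF_head_hit (c0 : String) (rest : List String) (cols : List String) :
    ∀ b : Option (Int × String), (∀ p, b = some p → 0 < p.1) →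
    fcci_findcol c0 cols ≠ none →
    (fcci_bestF (c0 :: rest) b cols).map (·.2) = fcci_findcol c0 cols := by
  induction cols with
  | nil => intro b _ hex; exact absurd rfl hex
  | cons col cs ih =>
      intro b hb hex
      have hstep : fcci_bestF (c0 :: rest) b (col :: cs) =
          fcci_bestF (c0 :: rest) (fcci_combine b (fcci_idx? (c0 :: rest) (PySem.Str.lower col)) col) cs := rfl
      by_cases h : PySem.Str.lower col = c0
      · have hidx : fcci_idx? (c0 :: rest) (PySem.Str.lower col) = some 0 := by
          rw [fcci_idx?_cons, if_pos h.symm]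
        have hcomb : fcci_combine b (some 0) col = some (0, col) := by
          cases hbv : b with
          | none => rfl
          | some p =>
              have := hb p hbv
              simp [fcci_combine, this]
        rw [hstep, hidx, hcomb, fcci_bestF_zero_fixed]
        simp [fcci_findcol, if_pos h]
      · have hidx : fcci_idx? (c0 :: rest) (PySem.Str.lower col) =
            (fcci_idx? rest (PySem.Str.lower col)).map (· + 1) := by
          rw [fcci_idx?_cons, if_neg (fun h' => h h'.symm)]
        have hex' : fcci_findcol c0 cs ≠ none := by
          simpa [fcci_findcol, if_neg h] using hex
        have hb' : ∀ p, fcci_combine b (fcci_idx? (c0 :: rest) (PySem.Str.lower col)) col = some p → 0 < p.1 := by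
          rw [hidx]
          cases hr : fcci_idx? rest (PySem.Str.lower col) with
          | none => simpa [fcci_combine] using hb
          | some i =>
              have hi := fcci_idx?_nonneg _ _ _ hr
              intro p hp
              cases hbv : b with
              | none =>
                  rw [hbv] at hp
                  simp [fcci_combine] at hp
                  subst hp; simp; omega
              | some q =>
                  have hq := hb q hbv
                  rw [hbv] at hp
                  simp only [fcci_combine, Option.map_some] at hp
                  by_cases hlt : i + 1 < q.1
                  · rw [if_pos hlt] at hp
                    injection hp with hpe
                    subst hpe; simp; omega
                  · rw [if_neg hlt] at hp
                    injection hp with hpe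
                    subst hpe; exact hq
        rw [hstep]
        rw [ih _ hb' hex']
        simp [fcci_findcol, if_neg h]

-- when no column matches candidate 0, dropping it only shifts the kept indices by one
theorem fcci_bestF_shift (c0 : String) (rest : List String) (cols : List String)
    (hmiss : fcci_findcol c0 cols = none) :
    ∀ b : Option (Int × String),
      fcci_bestF (c0 :: rest) (b.map (fun p => (p.1 + 1, p.2))) cols =
        (fcci_bestF rest b cols).map (fun p => (p.1 + 1, p.2)) := by
  induction cols with
  | nil => intro b; rfl
  | cons col cs ih =>
      intro b
      have h : PySem.Str.lower col ≠ c0 := by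
        intro h; rw [fcci_findcol, if_pos h] at hmiss; simp at hmiss
      have hmiss' : fcci_findcol c0 cs = none := by
        rwa [fcci_findcol, if_neg h] at hmiss
      have hidx : fcci_idx? (c0 :: rest) (PySem.Str.lower col) =
          (fcci_idx? rest (PySem.Str.lower col)).map (· + 1) := by
        rw [fcci_idx?_cons, if_neg (fun h' => h h'.symm)]
      have hstep : ∀ (cl : List String) (b' : Option (Int × String)),
          fcci_bestF cl b' (col :: cs) = fcci_bestF cl (fcci_combine b' (fcci_idx? cl (PySem.Str.lower col)) col) cs := by
        intro cl b'; rfl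
      rw [hstep, hstep, hidx]
      rw [← ih hmiss']
      congr 1
      cases hr : fcci_idx? rest (PySem.Str.lower col) with
      | none => cases b <;> rfl
      | some i =>
          cases b with
          | none => rfl
          | some q =>
              simp only [fcci_combine, Option.map_some]
              by_cases hlt : i < q.1
              · rw [if_pos hlt, if_pos (by omega : i + 1 < q.1 + 1)]; rfl
              · rw [if_neg hlt, if_neg (by omega : ¬ i + 1 < q.1 + 1)]; rfl

-- B's best accumulator computes A's phase 1
theorem fcci_bestF_eq_phase1L (cands_l : List String) :
    ∀ cols : List String,
      (fcci_bestF cands_l none cols).map (·.2) = fcci_phase1L cols cands_l := by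
  induction cands_l with
  | nil => intro cols; rw [fcci_bestF_nil_cands]; rfl
  | cons c0 rest ih =>
      intro cols
      cases hf : fcci_findcol c0 cols with
      | some col =>
          have := fcci_bestF_head_hit c0 rest cols none (by intro p hp; simp at hp)
            (by simp [hf])
          rw [this, hf]
          simp [fcci_phase1L, hf]
      | none =>
          have hsh := fcci_bestF_shift c0 rest cols hf none
          simp only [Option.map_none] at hsh
          have : (fcci_bestF (c0 :: rest) none cols).map (·.2) = (fcci_bestF rest none cols).map (·.2) := by
            rw [hsh, Option.map_map]; rfl
          rw [this, ih cols]
          simp [fcci_phase1L, hf]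

-- ===== VERDICT (by name: the statement is the Claim_ definition above) =====
theorem find_col_case_insensitive_spec : Claim_equal_find_col_case_insensitive := by
  intro columns candidates _
  unfold Spec_find_col_case_insensitive find_col_case_insensitive find_col_case_insensitive_alt
  show (match fcci_a_phase1 columns candidates with
        | some col => some col
        | none => fcci_phase2 candidates columns) =
      (match (List.foldl (fcci_b_step (candidates.map PySem.Str.lower) (fcci_first_idx (candidates.map PySem.Str.lower))) (none, none) columns).1 with
        | some b => some b.2
        | none =>
          match (List.foldl (fcci_b_step (candidates.map PySem.Str.lower) (fcci_first_idx (candidates.map PySem.Str.lower))) (none, none) columns).2 with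
          | some c => some c
          | none => none)
  rw [fcci_fold_split]
  have hb := fcci_bestF_eq_phase1L (candidates.map PySem.Str.lower) columns
  rw [← fcci_a_phase1_eq_L] at hb
  cases hbest : fcci_bestF (candidates.map PySem.Str.lower) none columns with
  | some p =>
      rw [hbest] at hb
      simp only [Option.map_some] at hb
      simp [← hb]
  | none =>
      rw [hbest] at hb
      simp only [Option.map_none] at hb
      rw [fcci_subF_eq]
      cases h2 : fcci_phase2 candidates columns <;> simp [← hb]
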